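-- pv_equiv track=rewrite | github.com/Alivenderwww/FLUX_CNN | toolchain/hw_files.py | compute_expected_ofm
-- ===== SOURCE A (Python) =====
-- def sdp_sim(psum_i32, mult, shift, zp_out, clip_min, clip_max, round_en, relu_en):
--     """
--     Per-tensor symmetric int8 SDP 硬件流水软件模拟。
--     输入 psum_i32 是 int32 累加器值（已含 bias），输出 8-bit（raw byte 位模式）。
--     """
--     prod = psum_i32 * mult                    # int64
--     if round_en and shift > 0:
--         prod += 1 << (shift - 1)
--     # Python 'signed right shift' for negative ints works as arithmetic
--     if prod >= 0:
--         q = prod >> shift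
--     else:
--         q = -((-prod) >> shift) if (-prod) & ((1 << shift) - 1) == 0 else -(((-prod) >> shift) + 1)
--     q_zp = q + zp_out
--     if relu_en and q_zp < 0:
--         q_zp = 0
--     if q_zp < clip_min: q_zp = clip_min
--     if q_zp > clip_max: q_zp = clip_max
--     return q_zp & 0xFF
--
-- def compute_expected_ofm(
--     H_IN, W_IN, K, NUM_CIN, NUM_COUT, stride, pad_top, pad_left,
--     ifm_arr, w_arr, bias_arr,
--     sdp_mult, sdp_shift, sdp_zp_out, sdp_clip_min, sdp_clip_max,
--     sdp_round_en, sdp_relu_en,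
-- ):
--     """
--     模拟硬件一轮 Conv + SDP 量化流水。返回 [H_OUT][W_OUT][NUM_COUT] 8-bit int。
--     """
--     H_OUT = (H_IN + 2 * pad_top - K) // stride + 1    # 假设对称 pad
--     W_OUT = (W_IN + 2 * pad_left - K) // stride + 1
--     ofm = [[[0] * NUM_COUT for _ in range(W_OUT)] for _ in range(H_OUT)]
--     for yout in range(H_OUT):
--         for px in range(W_OUT):
--             for cout in range(NUM_COUT):
--                 psum = bias_arr[cout] if bias_arr is not None else 0
--                 for ky in range(K):
--                     for kx in range(K):
--                         iy = yout * stride + ky - pad_top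
--                         ix = px   * stride + kx - pad_left
--                         if 0 <= iy < H_IN and 0 <= ix < W_IN:
--                             for cin in range(NUM_CIN):
--                                 psum += ifm_arr[iy][ix][cin] * w_arr[ky][kx][cout][cin]
--                         # pad: contributes 0
--                 ofm[yout][px][cout] = sdp_sim(
--                     psum, sdp_mult, sdp_shift, sdp_zp_out,
--                     sdp_clip_min, sdp_clip_max, sdp_round_en, sdp_relu_en)
--     return ofm, H_OUT, W_OUT
-- ===== SOURCE B (Python) =====
-- def sdp_sim(psum_i32, mult, shift, zp_out, clip_min, clip_max, round_en, relu_en):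
--     prod = psum_i32 * mult
--     if round_en and shift > 0:
--         prod += 1 << (shift - 1)
--     if prod >= 0:
--         q = prod >> shift
--     else:
--         q = -((-prod) >> shift) if (-prod) & ((1 << shift) - 1) == 0 else -(((-prod) >> shift) + 1)
--     q_zp = q + zp_out
--     if relu_en and q_zp < 0:
--         q_zp = 0
--     if q_zp < clip_min: q_zp = clip_min
--     if q_zp > clip_max: q_zp = clip_max
--     return q_zp & 0xFF
--
-- def compute_expected_ofm(
--     H_IN, W_IN, K, NUM_CIN, NUM_COUT, stride, pad_top, pad_left,
--     ifm_arr, w_arr, bias_arr,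
--     sdp_mult, sdp_shift, sdp_zp_out, sdp_clip_min, sdp_clip_max,
--     sdp_round_en, sdp_relu_en,
-- ):
--     # im2col formulation: one flattened tap list, per-cout flattened weight rows
--     # built once, and per-position patch rows reused across all output channels.
--     H_OUT = (H_IN + 2 * pad_top - K) // stride + 1
--     W_OUT = (W_IN + 2 * pad_left - K) // stride + 1
--     if H_OUT <= 0 or W_OUT <= 0 or NUM_COUT <= 0:
--         # empty output: nothing to convolve, skip the im2col setup
--         return [[[0] * NUM_COUT for _ in range(W_OUT)] for _ in range(H_OUT)], H_OUT, W_OUT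
--     taps = [(ky, kx, cin) for ky in range(K) for kx in range(K) for cin in range(NUM_CIN)]
--     wrows = [[w_arr[ky][kx][cout][cin] for (ky, kx, cin) in taps]
--              for cout in range(NUM_COUT)]
--     biases = [bias_arr[cout] if bias_arr is not None else 0 for cout in range(NUM_COUT)]
--     ofm = []
--     for yout in range(H_OUT):
--         row = []
--         for px in range(W_OUT):
--             patch = [ifm_arr[iy][ix][cin]
--                      if 0 <= iy < H_IN and 0 <= ix < W_IN else 0
--                      for (ky, kx, cin) in taps
--                      for iy in [yout * stride + ky - pad_top]
--                      for ix in [px * stride + kx - pad_left]]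
--             row.append([sdp_sim(b + sum(p * w for p, w in zip(patch, wr)),
--                                 sdp_mult, sdp_shift, sdp_zp_out,
--                                 sdp_clip_min, sdp_clip_max, sdp_round_en, sdp_relu_en)
--                         for b, wr in zip(biases, wrows)])
--         ofm.append(row)
--     return ofm, H_OUT, W_OUT
-- ===== Notes on version B (the rewrite author's own statement) =====
-- stated objective: alternative
-- what changed: Replaces the 5-deep per-channel accumulation loop nest by an im2col formulation: a flattened tap list and per-channel flattened weight rows are built once (skipped when the output is empty), each output position builds one padded patch row reused across all output channels, and every output entry is sdp_sim(bias + dot(patch, weight_row)).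
import Mathlib
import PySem

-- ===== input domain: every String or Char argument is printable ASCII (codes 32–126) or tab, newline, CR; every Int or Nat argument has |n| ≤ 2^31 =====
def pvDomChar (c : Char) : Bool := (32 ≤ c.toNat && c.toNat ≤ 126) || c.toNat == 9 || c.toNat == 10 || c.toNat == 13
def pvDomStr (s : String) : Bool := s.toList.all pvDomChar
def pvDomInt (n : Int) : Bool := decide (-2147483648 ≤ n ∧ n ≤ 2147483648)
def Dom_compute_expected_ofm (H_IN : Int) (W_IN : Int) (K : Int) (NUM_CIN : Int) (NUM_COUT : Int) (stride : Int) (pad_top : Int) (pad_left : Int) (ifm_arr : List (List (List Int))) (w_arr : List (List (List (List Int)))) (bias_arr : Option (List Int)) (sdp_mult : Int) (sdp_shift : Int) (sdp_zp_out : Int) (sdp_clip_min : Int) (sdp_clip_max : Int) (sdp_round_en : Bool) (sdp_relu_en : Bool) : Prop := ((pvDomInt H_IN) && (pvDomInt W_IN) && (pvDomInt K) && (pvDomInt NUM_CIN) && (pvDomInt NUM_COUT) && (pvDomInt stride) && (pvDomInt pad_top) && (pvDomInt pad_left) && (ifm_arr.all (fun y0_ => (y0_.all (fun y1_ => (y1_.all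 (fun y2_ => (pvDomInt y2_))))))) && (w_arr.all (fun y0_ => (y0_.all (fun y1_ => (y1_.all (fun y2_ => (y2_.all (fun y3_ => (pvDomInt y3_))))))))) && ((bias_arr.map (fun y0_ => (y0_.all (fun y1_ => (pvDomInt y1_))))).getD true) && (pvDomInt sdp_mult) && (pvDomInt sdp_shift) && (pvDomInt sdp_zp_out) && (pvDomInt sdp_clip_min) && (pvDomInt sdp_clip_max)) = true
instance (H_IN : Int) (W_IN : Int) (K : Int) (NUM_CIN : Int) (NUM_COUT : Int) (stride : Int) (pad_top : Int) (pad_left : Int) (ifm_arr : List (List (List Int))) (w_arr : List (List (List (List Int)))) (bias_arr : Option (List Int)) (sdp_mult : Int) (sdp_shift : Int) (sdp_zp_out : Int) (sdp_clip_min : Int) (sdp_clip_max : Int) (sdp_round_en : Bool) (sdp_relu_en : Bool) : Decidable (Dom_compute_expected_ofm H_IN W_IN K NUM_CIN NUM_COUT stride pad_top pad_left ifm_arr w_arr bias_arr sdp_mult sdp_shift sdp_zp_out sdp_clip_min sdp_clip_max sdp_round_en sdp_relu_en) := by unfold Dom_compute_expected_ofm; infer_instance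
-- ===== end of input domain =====

-- B replaces A's 5-deep per-channel accumulation loop nest by an im2col formulation
-- (flattened tap list, per-channel flattened weight rows built once, one patch row per
-- output position reused across channels, dot product per entry); return value unchanged.

-- ===== PORT A =====
-- shared helper: transliteration of sdp_sim (Python '>>'/'<<' are Lean's '>>>'/'<<<' on Int
-- with a Nat shift, exact since Pre_ gives 0 ≤ shift; '&' is PySem.Int.band, 'x & 0xFF' too)
def pvSdpSim (psum_i32 mult shift zp_out clip_min clip_max : Int) (round_en relu_en : Bool) : Int :=
  let prod := psum_i32 * mult
  let prod := if round_en ∧ shift > 0 then prod + ((1 : Int) <<< (shift - 1).toNat) else prod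
  let q :=
    if prod ≥ 0 then prod >>> shift.toNat
    else if PySem.Int.band (-prod) (((1 : Int) <<< shift.toNat) - 1) = 0 then
      -((-prod) >>> shift.toNat)
    else
      -(((-prod) >>> shift.toNat) + 1)
  let q_zp := q + zp_out
  let q_zp := if relu_en ∧ q_zp < 0 then 0 else q_zp
  let q_zp := if q_zp < clip_min then clip_min else q_zp
  let q_zp := if q_zp > clip_max then clip_max else q_zp
  PySem.Int.band q_zp 255

-- literal port of A: each ofm cell is written exactly once in loop order, so the
-- zero-init + in-place assignment is transcribed as nested maps over the same ranges;
-- list indexing uses pyGetD (in range under Pre_, where Python never raises)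
def compute_expected_ofm (H_IN : Int) (W_IN : Int) (K : Int) (NUM_CIN : Int) (NUM_COUT : Int) (stride : Int) (pad_top : Int) (pad_left : Int) (ifm_arr : List (List (List Int))) (w_arr : List (List (List (List Int)))) (bias_arr : Option (List Int)) (sdp_mult : Int) (sdp_shift : Int) (sdp_zp_out : Int) (sdp_clip_min : Int) (sdp_clip_max : Int) (sdp_round_en : Bool) (sdp_relu_en : Bool) : List (List (List Int)) × Int × Int :=
  let H_OUT := PySem.Int.floordiv (H_IN + 2 * pad_top - K) stride + 1
  let W_OUT := PySem.Int.floordiv (W_IN + 2 * pad_left - K) stride + 1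
  let ofm := (PySem.List.pyRange 0 H_OUT 1).map (fun yout =>
    (PySem.List.pyRange 0 W_OUT 1).map (fun px =>
      (PySem.List.pyRange 0 NUM_COUT 1).map (fun cout =>
        let psum0 : Int := match bias_arr with
          | some b => PySem.List.pyGetD b cout 0
          | none => 0
        let psum := (PySem.List.pyRange 0 K 1).foldl (fun psum ky =>
          (PySem.List.pyRange 0 K 1).foldl (fun psum kx =>
            let iy := yout * stride + ky - pad_top
            let ix := px * stride + kx - pad_left
            if 0 ≤ iy ∧ iy < H_IN ∧ 0 ≤ ix ∧ ix < W_IN then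
              (PySem.List.pyRange 0 NUM_CIN 1).foldl (fun psum cin =>
                psum +
                  PySem.List.pyGetD (PySem.List.pyGetD (PySem.List.pyGetD ifm_arr iy []) ix []) cin 0 *
                  PySem.List.pyGetD (PySem.List.pyGetD (PySem.List.pyGetD (PySem.List.pyGetD w_arr ky []) kx []) cout []) cin 0) psum
            else psum) psum) psum0
        pvSdpSim psum sdp_mult sdp_shift sdp_zp_out sdp_clip_min sdp_clip_max sdp_round_en sdp_relu_en)))
  (ofm, H_OUT, W_OUT)

-- ===== PORT B =====
-- flattened tap list [(ky, kx, cin)], built once (im2col column index set)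
def pvTaps (K NUM_CIN : Int) : List (Int × Int × Int) :=
  (PySem.List.pyRange 0 K 1).flatMap (fun ky =>
    (PySem.List.pyRange 0 K 1).flatMap (fun kx =>
      (PySem.List.pyRange 0 NUM_CIN 1).map (fun cin => (ky, kx, cin))))

def compute_expected_ofm_alt (H_IN : Int) (W_IN : Int) (K : Int) (NUM_CIN : Int) (NUM_COUT : Int) (stride : Int) (pad_top : Int) (pad_left : Int) (ifm_arr : List (List (List Int))) (w_arr : List (List (List (List Int)))) (bias_arr : Option (List Int)) (sdp_mult : Int) (sdp_shift : Int) (sdp_zp_out : Int) (sdp_clip_min : Int) (sdp_clip_max : Int) (sdp_round_en : Bool) (sdp_relu_en : Bool) : List (List (List Int)) × Int × Int :=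
  let H_OUT := PySem.Int.floordiv (H_IN + 2 * pad_top - K) stride + 1
  let W_OUT := PySem.Int.floordiv (W_IN + 2 * pad_left - K) stride + 1
  if 0 < H_OUT ∧ 0 < W_OUT ∧ 0 < NUM_COUT then
    let taps := pvTaps K NUM_CIN
    let wrows := (PySem.List.pyRange 0 NUM_COUT 1).map (fun cout =>
      taps.map (fun t =>
        PySem.List.pyGetD (PySem.List.pyGetD (PySem.List.pyGetD (PySem.List.pyGetD w_arr t.1 []) t.2.1 []) cout []) t.2.2 0))
    let biases := (PySem.List.pyRange 0 NUM_COUT 1).map (fun cout =>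
      match bias_arr with
      | some b => PySem.List.pyGetD b cout 0
      | none => 0)
    let ofm := (PySem.List.pyRange 0 H_OUT 1).map (fun yout =>
      (PySem.List.pyRange 0 W_OUT 1).map (fun px =>
        let patch := taps.map (fun t =>
          let iy := yout * stride + t.1 - pad_top
          let ix := px * stride + t.2.1 - pad_left
          if 0 ≤ iy ∧ iy < H_IN ∧ 0 ≤ ix ∧ ix < W_IN then
            PySem.List.pyGetD (PySem.List.pyGetD (PySem.List.pyGetD ifm_arr iy []) ix []) t.2.2 0
          else 0)
        (biases.zip wrows).map (fun bw =>
          pvSdpSim (bw.1 + (patch.zip bw.2).foldl (fun a pw => a + pw.1 * pw.2) 0)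
            sdp_mult sdp_shift sdp_zp_out sdp_clip_min sdp_clip_max sdp_round_en sdp_relu_en)))
    (ofm, H_OUT, W_OUT)
  else
    -- empty output: [[[0]*NUM_COUT for _ in range(W_OUT)] for _ in range(H_OUT)]
    ((PySem.List.pyRange 0 H_OUT 1).map (fun _ =>
      (PySem.List.pyRange 0 W_OUT 1).map (fun _ => List.replicate NUM_COUT.toNat (0 : Int))),
     H_OUT, W_OUT)

-- ===== PRECONDITION & SPEC =====
-- Pre_: nonzero stride (stride 0 is a ZeroDivisionError); and whenever the output grid
-- is nonempty, a nonnegative SDP shift (negative raises ValueError) and tensors whose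
-- list shapes cover the declared dims (shorter lists raise IndexError when accessed).
-- Slightly narrower than "A returns": with a nonempty output A tolerates ragged tensor
-- entries its tap/range tests happen never to reach (see claim cites).
def Pre_compute_expected_ofm (H_IN : Int) (W_IN : Int) (K : Int) (NUM_CIN : Int) (NUM_COUT : Int) (stride : Int) (pad_top : Int) (pad_left : Int) (ifm_arr : List (List (List Int))) (w_arr : List (List (List (List Int)))) (bias_arr : Option (List Int)) (sdp_mult : Int) (sdp_shift : Int) (sdp_zp_out : Int) (sdp_clip_min : Int) (sdp_clip_max : Int) (sdp_round_en : Bool) (sdp_relu_en : Bool) : Prop :=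
  stride ≠ 0 ∧
  ((0 < PySem.Int.floordiv (H_IN + 2 * pad_top - K) stride + 1 ∧
    0 < PySem.Int.floordiv (W_IN + 2 * pad_left - K) stride + 1 ∧
    0 < NUM_COUT) →
    (0 ≤ sdp_shift ∧
     H_IN ≤ (ifm_arr.length : Int) ∧
     (∀ r ∈ ifm_arr, W_IN ≤ (r.length : Int) ∧ ∀ p ∈ r, NUM_CIN ≤ (p.length : Int)) ∧
     K ≤ (w_arr.length : Int) ∧
     (∀ a ∈ w_arr, K ≤ (a.length : Int) ∧
       ∀ b ∈ a, NUM_COUT ≤ (b.length : Int) ∧ ∀ c ∈ b, NUM_CIN ≤ (c.length : Int)) ∧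
     ((bias_arr.map (fun b => decide (NUM_COUT ≤ (b.length : Int)))).getD true = true)))
instance (H_IN : Int) (W_IN : Int) (K : Int) (NUM_CIN : Int) (NUM_COUT : Int) (stride : Int) (pad_top : Int) (pad_left : Int) (ifm_arr : List (List (List Int))) (w_arr : List (List (List (List Int)))) (bias_arr : Option (List Int)) (sdp_mult : Int) (sdp_shift : Int) (sdp_zp_out : Int) (sdp_clip_min : Int) (sdp_clip_max : Int) (sdp_round_en : Bool) (sdp_relu_en : Bool) : Decidable (Pre_compute_expected_ofm H_IN W_IN K NUM_CIN NUM_COUT stride pad_top pad_left ifm_arr w_arr bias_arr sdp_mult sdp_shift sdp_zp_out sdp_clip_min sdp_clip_max sdp_round_en sdp_relu_en) := by unfold Pre_compute_expected_ofm; infer_instance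

def pvWitness_compute_expected_ofm : Int × Int × Int × Int × Int × Int × Int × Int × List (List (List Int)) × List (List (List (List Int))) × Option (List Int) × Int × Int × Int × Int × Int × Bool × Bool :=
  (2, 2, 1, 1, 1, 1, 0, 0, [[[1], [2]], [[3], [4]]], [[[[1]]]], some [3], 1, 0, 0, -128, 127, false, false)

def Spec_compute_expected_ofm (H_IN : Int) (W_IN : Int) (K : Int) (NUM_CIN : Int) (NUM_COUT : Int) (stride : Int) (pad_top : Int) (pad_left : Int) (ifm_arr : List (List (List Int))) (w_arr : List (List (List (List Int)))) (bias_arr : Option (List Int)) (sdp_mult : Int) (sdp_shift : Int) (sdp_zp_out : Int) (sdp_clip_min : Int) (sdp_clip_max : Int) (sdp_round_en : Bool) (sdp_relu_en : Bool) (out : List (List (List Int)) × Int × Int) : Prop := out = compute_expected_ofm_alt H_IN W_IN K NUM_CIN NUM_COUT stride pad_top pad_left ifm_arr w_arr bias_arr sdp_mult sdp_shift sdp_zp_out sdp_clip_min sdp_clip_max sdp_round_en sdp_relu_en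
instance (H_IN : Int) (W_IN : Int) (K : Int) (NUM_CIN : Int) (NUM_COUT : Int) (stride : Int) (pad_top : Int) (pad_left : Int) (ifm_arr : List (List (List Int))) (w_arr : List (List (List (List Int)))) (bias_arr : Option (List Int)) (sdp_mult : Int) (sdp_shift : Int) (sdp_zp_out : Int) (sdp_clip_min : Int) (sdp_clip_max : Int) (sdp_round_en : Bool) (sdp_relu_en : Bool) (out : List (List (List Int)) × Int × Int) : Decidable (Spec_compute_expected_ofm H_IN W_IN K NUM_CIN NUM_COUT stride pad_top pad_left ifm_arr w_arr bias_arr sdp_mult sdp_shift sdp_zp_out sdp_clip_min sdp_clip_max sdp_round_en sdp_relu_en out) := by unfold Spec_compute_expected_ofm; infer_instance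

-- ===== CLAIM =====
def Claim_equal_compute_expected_ofm : Prop := ∀ (H_IN : Int) (W_IN : Int) (K : Int) (NUM_CIN : Int) (NUM_COUT : Int) (stride : Int) (pad_top : Int) (pad_left : Int) (ifm_arr : List (List (List Int))) (w_arr : List (List (List (List Int)))) (bias_arr : Option (List Int)) (sdp_mult : Int) (sdp_shift : Int) (sdp_zp_out : Int) (sdp_clip_min : Int) (sdp_clip_max : Int) (sdp_round_en : Bool) (sdp_relu_en : Bool), Dom_compute_expected_ofm H_IN W_IN K NUM_CIN NUM_COUT stride pad_top pad_left ifm_arr w_arr bias_arr sdp_mult sdp_shift sdp_zp_out sdp_clip_min sdp_clip_max sdp_round_en sdp_relu_en → Pre_compute_expected_ofm H_IN W_IN K NUM_CIN NUM_COUT stride pad_top pad_left ifm_arr w_arr bias_arr sdp_mult sdp_shift sdp_zp_out sdp_clip_min sdp_clip_max sdp_round_en sdp_relu_en → Spec_compute_expected_ofm H_IN W_IN K NUM_CIN NUM_COUT stride pad_top pad_left ifm_arr w_arr bias_arr sdp_mult sdp_shift sdp_zp_out sdp_clip_min sdp_clip_max sdp_round_en sdp_relu_en (compute_expected_ofm H_IN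 W_IN K NUM_CIN NUM_COUT stride pad_top pad_left ifm_arr w_arr bias_arr sdp_mult sdp_shift sdp_zp_out sdp_clip_min sdp_clip_max sdp_round_en sdp_relu_en)

-- ===== LEMMAS AND PROOFS =====
-- accumulation shape specific to these ports: a foldl whose step adds g x equals init + sum
theorem pv_foldl_add_of_step {α : Type} (l : List α) (step : Int → α → Int) (g : α → Int)
    (h : ∀ a x, step a x = a + g x) (a : Int) :
    l.foldl step a = a + (l.map g).sum := by
  induction l generalizing a with
  | nil => simp
  | cons x xs ih => simp [h, ih, add_assoc]

-- A's 4-deep accumulation for one output cell equals B's bias + dot(patch, weight row)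
theorem pv_psum_eq (H_IN W_IN K NUM_CIN stride pad_top pad_left : Int)
    (ifm_arr : List (List (List Int))) (wf : Int × Int × Int → Int)
    (yout px psum0 : Int) :
    (PySem.List.pyRange 0 K 1).foldl (fun psum ky =>
      (PySem.List.pyRange 0 K 1).foldl (fun psum kx =>
        let iy := yout * stride + ky - pad_top
        let ix := px * stride + kx - pad_left
        if 0 ≤ iy ∧ iy < H_IN ∧ 0 ≤ ix ∧ ix < W_IN then
          (PySem.List.pyRange 0 NUM_CIN 1).foldl (fun psum cin =>
            psum +
              PySem.List.pyGetD (PySem.List.pyGetD (PySem.List.pyGetD ifm_arr iy []) ix []) cin 0 *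
              wf (ky, kx, cin)) psum
        else psum) psum) psum0
    = psum0 +
      (((pvTaps K NUM_CIN).map (fun t =>
          let iy := yout * stride + t.1 - pad_top
          let ix := px * stride + t.2.1 - pad_left
          if 0 ≤ iy ∧ iy < H_IN ∧ 0 ≤ ix ∧ ix < W_IN then
            PySem.List.pyGetD (PySem.List.pyGetD (PySem.List.pyGetD ifm_arr iy []) ix []) t.2.2 0
          else 0)).zip ((pvTaps K NUM_CIN).map wf)).foldl (fun a pw => a + pw.1 * pw.2) 0 := by
  rw [List.zip_map', pv_foldl_add_of_step _ _ (fun pw : Int × Int => pw.1 * pw.2) (fun _ _ => rfl) 0,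
      List.map_map]
  rw [pv_foldl_add_of_step _ _
      (fun ky => ((PySem.List.pyRange 0 K 1).map (fun kx =>
        if 0 ≤ yout * stride + ky - pad_top ∧ yout * stride + ky - pad_top < H_IN ∧
           0 ≤ px * stride + kx - pad_left ∧ px * stride + kx - pad_left < W_IN then
          ((PySem.List.pyRange 0 NUM_CIN 1).map (fun cin =>
            PySem.List.pyGetD (PySem.List.pyGetD (PySem.List.pyGetD ifm_arr (yout * stride + ky - pad_top) []) (px * stride + kx - pad_left) []) cin 0 *
            wf (ky, kx, cin))).sum
        else 0)).sum)
      ?_ psum0]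
  · rw [zero_add]
    congr 1
    simp only [pvTaps]
    rw [List.map_flatMap, List.flatMap_def, List.sum_flatten, List.map_map]
    refine congrArg List.sum (List.map_congr_left ?_)
    intro ky _
    dsimp only [Function.comp]
    rw [List.map_flatMap, List.flatMap_def, List.sum_flatten, List.map_map]
    refine congrArg List.sum (List.map_congr_left ?_)
    intro kx _
    dsimp only [Function.comp]
    rw [List.map_map]
    by_cases hc : 0 ≤ yout * stride + ky - pad_top ∧ yout * stride + ky - pad_top < H_IN ∧
        0 ≤ px * stride + kx - pad_left ∧ px * stride + kx - pad_left < W_IN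
    · rw [if_pos hc]
      refine congrArg List.sum (List.map_congr_left ?_)
      intro cin _
      dsimp only [Function.comp]
      rw [if_pos hc]
    · rw [if_neg hc]
      symm
      refine List.sum_eq_zero ?_
      intro x hx
      obtain ⟨cin, -, rfl⟩ := List.mem_map.mp hx
      dsimp only [Function.comp]
      rw [if_neg hc, zero_mul]
  · intro a ky
    rw [pv_foldl_add_of_step _ _
        (fun kx =>
          if 0 ≤ yout * stride + ky - pad_top ∧ yout * stride + ky - pad_top < H_IN ∧
             0 ≤ px * stride + kx - pad_left ∧ px * stride + kx - pad_left < W_IN then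
            ((PySem.List.pyRange 0 NUM_CIN 1).map (fun cin =>
              PySem.List.pyGetD (PySem.List.pyGetD (PySem.List.pyGetD ifm_arr (yout * stride + ky - pad_top) []) (px * stride + kx - pad_left) []) cin 0 *
              wf (ky, kx, cin))).sum
          else 0)
        ?_ a]
    intro a kx
    dsimp only
    by_cases hc : 0 ≤ yout * stride + ky - pad_top ∧ yout * stride + ky - pad_top < H_IN ∧
        0 ≤ px * stride + kx - pad_left ∧ px * stride + kx - pad_left < W_IN
    · rw [if_pos hc, if_pos hc, pv_foldl_add_of_step _ _ _ (fun _ _ => rfl) a]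
    · rw [if_neg hc, if_neg hc, add_zero]

theorem pv_core_eq (H_IN W_IN K NUM_CIN NUM_COUT stride pad_top pad_left : Int)
    (ifm_arr : List (List (List Int))) (w_arr : List (List (List (List Int))))
    (bias_arr : Option (List Int)) (sdp_mult sdp_shift sdp_zp_out sdp_clip_min sdp_clip_max : Int)
    (sdp_round_en sdp_relu_en : Bool) :
    compute_expected_ofm H_IN W_IN K NUM_CIN NUM_COUT stride pad_top pad_left ifm_arr w_arr bias_arr sdp_mult sdp_shift sdp_zp_out sdp_clip_min sdp_clip_max sdp_round_en sdp_relu_en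
    = compute_expected_ofm_alt H_IN W_IN K NUM_CIN NUM_COUT stride pad_top pad_left ifm_arr w_arr bias_arr sdp_mult sdp_shift sdp_zp_out sdp_clip_min sdp_clip_max sdp_round_en sdp_relu_en := by
  unfold compute_expected_ofm compute_expected_ofm_alt
  dsimp only
  by_cases hg : 0 < PySem.Int.floordiv (H_IN + 2 * pad_top - K) stride + 1 ∧
      0 < PySem.Int.floordiv (W_IN + 2 * pad_left - K) stride + 1 ∧ 0 < NUM_COUT
  case neg =>
    rw [if_neg hg]
    simp only [not_and_or, not_lt] at hg
    rcases hg with h | h | h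
    · simp [PySem.List.pyRange_one_eq_nil h]
    · simp [PySem.List.pyRange_one_eq_nil h]
    · simp [PySem.List.pyRange_one_eq_nil h, Int.toNat_of_nonpos h]
  rw [if_pos hg]
  congr 1
  refine List.map_congr_left ?_
  intro yout _
  refine List.map_congr_left ?_
  intro px _
  rw [List.zip_map', List.map_map]
  refine List.map_congr_left ?_
  intro cout _
  dsimp only [Function.comp]
  refine congrArg (fun p => pvSdpSim p sdp_mult sdp_shift sdp_zp_out sdp_clip_min sdp_clip_max sdp_round_en sdp_relu_en) ?_
  exact pv_psum_eq H_IN W_IN K NUM_CIN stride pad_top pad_left ifm_arr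
    (fun t => PySem.List.pyGetD (PySem.List.pyGetD (PySem.List.pyGetD (PySem.List.pyGetD w_arr t.1 []) t.2.1 []) cout []) t.2.2 0)
    yout px _

-- ===== VERDICT =====
theorem compute_expected_ofm_spec : Claim_equal_compute_expected_ofm := by
  intro H_IN W_IN K NUM_CIN NUM_COUT stride pad_top pad_left ifm_arr w_arr bias_arr sdp_mult sdp_shift sdp_zp_out sdp_clip_min sdp_clip_max sdp_round_en sdp_relu_en _ _
  exact pv_core_eq H_IN W_IN K NUM_CIN NUM_COUT stride pad_top pad_left ifm_arr w_arr bias_arr sdp_mult sdp_shift sdp_zp_out sdp_clip_min sdp_clip_max sdp_round_en sdp_relu_en
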